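-- pv_equiv track=rewrite | github.com/alexeybutyrev/leetcode-solutions | solutions/2289. Steps to Make Array Non-decreasing/solution.py | totalSteps
-- ===== SOURCE A (Python) =====
-- from typing import List
--
-- def totalSteps(A: List[int]) -> int:
--
--     stack = []
--     N = len(A)
--     dp = [0] * N
--     ans = 0
--     for i in range(N-1,-1,-1):
--         while stack and A[i] > A[stack[-1]]:
--             dp[i] = max(dp[i] + 1, dp[stack.pop()])
--             ans = max(ans,dp[i])
--         stack.append(i)
--
--     return ans
-- ===== SOURCE B (Python) =====
-- def totalSteps(A):
--     # Direct round-by-round simulation: in each round delete, all at once,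
--     # every element smaller than its current left neighbour; count rounds
--     # until a round would delete nothing.
--     cur = list(A)
--     steps = 0
--     while any(a > b for a, b in zip(cur, cur[1:])):
--         cur = cur[:1] + [b for a, b in zip(cur, cur[1:]) if a <= b]
--         steps += 1
--     return steps
-- ===== Notes on version B (the rewrite author's own statement) =====
-- stated objective: alternative
-- what changed: Replaces the right-to-left monotonic stack with dp step counts by a direct round-by-round simulation that repeatedly deletes, simultaneously, every element smaller than its left neighbour and counts the rounds; simpler to see correct but quadratic in the worst case.
import Mathlib
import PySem

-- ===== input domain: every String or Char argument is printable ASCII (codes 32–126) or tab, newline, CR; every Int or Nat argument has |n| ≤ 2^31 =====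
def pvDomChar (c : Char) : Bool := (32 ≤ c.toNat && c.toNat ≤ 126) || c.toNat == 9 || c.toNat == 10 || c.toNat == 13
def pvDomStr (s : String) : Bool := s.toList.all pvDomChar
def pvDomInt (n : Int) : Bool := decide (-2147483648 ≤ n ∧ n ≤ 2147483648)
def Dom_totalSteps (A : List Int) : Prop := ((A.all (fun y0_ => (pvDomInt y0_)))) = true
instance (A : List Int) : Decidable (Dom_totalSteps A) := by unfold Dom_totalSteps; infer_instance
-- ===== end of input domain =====

-- B replaces A's right-to-left monotonic stack + dp array by a direct round-by-round
-- simulation of the simultaneous removals (objective: alternative; not faster).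

-- ===== PORT A =====
-- inner 'while stack and A[i] > A[stack[-1]]' loop; stack top is the list head.
-- A[i], dp[i], dp[j] are read with pyGetD (exact: every index used is in range),
-- and 'dp[i] = v' is ported as dp.set i.toNat v (exact: 0 ≤ i < len(dp) always holds).
def whileA (Av : List Int) (i : Int) : List Int → List Int → Int → List Int × List Int × Int
  | [], dp, ans => ([], dp, ans)
  | j :: st, dp, ans =>
    if PySem.List.pyGetD Av i 0 > PySem.List.pyGetD Av j 0 then
      let v := max (PySem.List.pyGetD dp i 0 + 1) (PySem.List.pyGetD dp j 0)
      whileA Av i st (dp.set i.toNat v) (max ans v)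
    else (j :: st, dp, ans)

def totalSteps (A : List Int) : Int :=
  let N : Int := A.length
  (((PySem.List.pyRange (N - 1) (-1) (-1)).foldl
      (fun (s : List Int × List Int × Int) i =>
        let r := whileA A i s.1 s.2.1 s.2.2
        (i :: r.1, r.2.1, r.2.2))
      ([], List.replicate A.length 0, 0))).2.2

-- ===== PORT B =====
-- 'any(a > b for a, b in zip(cur, cur[1:]))' of Source B
def hasDescB (cur : List Int) : Bool := (cur.zip cur.tail).any (fun q => decide (q.1 > q.2))

-- 'cur[:1] + [b for a, b in zip(cur, cur[1:]) if a <= b]' of Source B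
def nextB (cur : List Int) : List Int :=
  cur.take 1 ++ ((cur.zip cur.tail).filter (fun q => decide (q.1 ≤ q.2))).map Prod.snd

-- termination of Source B's while loop: a round that deletes something shortens the list
lemma filter_length_lt {a : Type} (p : a → Bool) : ∀ (l : List a), (∃ q ∈ l, p q = false) →
    (l.filter p).length < l.length := by
  intro l
  induction l with
  | nil => rintro ⟨q, hq, _⟩; simp at hq
  | cons y ys ih =>
    rintro ⟨q, hq, hqf⟩
    rcases List.mem_cons.mp hq with h | h
    · subst h
      rw [List.filter_cons_of_neg (by simp [hqf])]
      have := List.length_filter_le p ys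
      simp only [List.length_cons]
      omega
    · have hlt := ih ⟨q, h, hqf⟩
      by_cases hy : p y = true
      · rw [List.filter_cons_of_pos hy]; simpa using hlt
      · rw [List.filter_cons_of_neg (by simpa using hy)]
        simp only [List.length_cons]
        omega

lemma nextB_len (cur : List Int) (h : hasDescB cur = true) : (nextB cur).length < cur.length := by
  cases cur with
  | nil => simp [hasDescB] at h
  | cons x xs =>
    obtain ⟨q, hq, hgt⟩ := List.any_eq_true.mp h
    have hflt : (((x :: xs).zip (x :: xs).tail).filter (fun q => decide (q.1 ≤ q.2))).length
        < ((x :: xs).zip (x :: xs).tail).length := by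
      refine filter_length_lt _ _ ⟨q, hq, ?_⟩
      simp only [decide_eq_true_eq] at hgt
      simp only [decide_eq_false_iff_not]
      omega
    have hz : ((x :: xs).zip (x :: xs).tail).length = xs.length := by
      simp [List.length_zip]
    simp only [nextB, List.length_append, List.length_map, List.length_take]
    simp only [hz] at hflt
    simp only [List.length_cons]
    omega

-- the while loop of Source B
def simLoopB (cur : List Int) (steps : Int) : Int :=
  if h : hasDescB cur = true then simLoopB (nextB cur) (steps + 1) else steps
termination_by cur.length
decreasing_by exact nextB_len cur h

def totalSteps_alt (A : List Int) : Int := simLoopB A 0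

-- ===== PRECONDITION & SPEC =====
def Spec_totalSteps (A : List Int) (out : Int) : Prop := out = totalSteps_alt A
instance (A : List Int) (out : Int) : Decidable (Spec_totalSteps A out) := by unfold Spec_totalSteps; infer_instance

-- ===== CLAIM (what is proved, stated in full; the proofs are below) =====
def Claim_equal_totalSteps : Prop := ∀ (A : List Int), Dom_totalSteps A → Spec_totalSteps A (totalSteps A)

-- ===== LEMMAS AND PROOFS =====

-- ---------- the simulation, in structured form ----------

-- one simultaneous round, chained on the ORIGINAL predecessor
def stepAux (p : Int) : List Int → List Int
  | [] => []
  | y :: ys => if p > y then stepAux y ys else y :: stepAux y ys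

def step : List Int → List Int
  | [] => []
  | x :: xs => x :: stepAux x xs

def desc (p : Int) : List Int → Bool
  | [] => false
  | y :: ys => decide (p > y) || desc y ys

def hasD : List Int → Bool
  | [] => false
  | x :: xs => desc x xs

lemma mem_stepAux {y : Int} : ∀ {p : Int} {xs : List Int}, y ∈ stepAux p xs → y ∈ xs := by
  intro p xs
  induction xs generalizing p with
  | nil => simp [stepAux]
  | cons z zs ih =>
    simp only [stepAux]
    split_ifs with h
    · intro hy; exact List.mem_cons_of_mem _ (ih hy)
    · intro hy
      rcases List.mem_cons.mp hy with h | h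
      · exact h ▸ List.mem_cons_self ..
      · exact List.mem_cons_of_mem _ (ih h)

lemma length_stepAux_le : ∀ (p : Int) (xs : List Int), (stepAux p xs).length ≤ xs.length := by
  intro p xs
  induction xs generalizing p with
  | nil => simp [stepAux]
  | cons z zs ih =>
    simp only [stepAux]
    split_ifs with h
    · exact le_trans (ih z) (by simp)
    · simpa using ih z

lemma length_stepAux_lt : ∀ (p : Int) (xs : List Int), desc p xs = true → (stepAux p xs).length < xs.length := by
  intro p xs
  induction xs generalizing p with
  | nil => simp [desc]
  | cons z zs ih =>
    intro h
    simp only [stepAux]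
    split_ifs with hc
    · exact lt_of_le_of_lt (length_stepAux_le z zs) (by simp)
    · simp only [desc, Bool.or_eq_true, decide_eq_true_eq] at h
      rcases h with h | h
      · exact absurd h hc
      · simpa using ih z h

lemma length_step_lt (L : List Int) (h : hasD L = true) : (step L).length < L.length := by
  cases L with
  | nil => simp [hasD] at h
  | cons x xs =>
    simp only [step, List.length_cons]
    exact Nat.succ_lt_succ (length_stepAux_lt x xs h)

def rounds (L : List Int) : Nat :=
  if h : hasD L = true then rounds (step L) + 1 else 0
termination_by L.length
decreasing_by exact length_step_lt L h

lemma rounds_of_desc {L : List Int} (h : hasD L = true) : rounds L = rounds (step L) + 1 := by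
  rw [rounds]; simp [h]

lemma rounds_of_not {L : List Int} (h : hasD L = false) : rounds L = 0 := by
  rw [rounds]; simp [h]

lemma stepAux_of_not_desc : ∀ {p : Int} {xs : List Int}, desc p xs = false → stepAux p xs = xs := by
  intro p xs
  induction xs generalizing p with
  | nil => simp [stepAux]
  | cons z zs ih =>
    intro h
    simp only [desc, Bool.or_eq_false_iff, decide_eq_false_iff_not] at h
    simp [stepAux, h.1, ih h.2]

-- ---------- bridging Source B's port to the structured simulation ----------

lemma zipFilter_eq_stepAux : ∀ (xs : List Int) (p : Int),
    (((p :: xs).zip xs).filter (fun q => decide (q.1 ≤ q.2))).map Prod.snd = stepAux p xs := by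
  intro xs
  induction xs with
  | nil => intro p; simp [stepAux]
  | cons y ys ih =>
    intro p
    by_cases hc : p > y
    · simp [List.zip_cons_cons, stepAux, hc, show ¬ (p ≤ y) by omega, ih y]
    · simp [List.zip_cons_cons, stepAux, hc, show p ≤ y by omega, ih y]

lemma zipAny_eq_desc : ∀ (xs : List Int) (p : Int),
    ((p :: xs).zip xs).any (fun q => decide (q.1 > q.2)) = desc p xs := by
  intro xs
  induction xs with
  | nil => intro p; simp [desc]
  | cons y ys ih =>
    intro p
    simp only [List.zip_cons_cons, List.any_cons, desc, ih y]

lemma hasDescB_eq_hasD (L : List Int) : hasDescB L = hasD L := by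
  cases L with
  | nil => simp [hasDescB, hasD]
  | cons x xs => simp only [hasDescB, List.tail_cons, hasD, zipAny_eq_desc]

lemma nextB_eq_step (L : List Int) : nextB L = step L := by
  cases L with
  | nil => simp [nextB, step]
  | cons x xs =>
    simp only [nextB, step, List.tail_cons, List.take_succ_cons, List.take_zero,
      zipFilter_eq_stepAux, List.singleton_append]

lemma simLoopB_eq : ∀ (n : Nat) (L : List Int) (s : Int), L.length ≤ n →
    simLoopB L s = s + (rounds L : Int) := by
  intro n
  induction n with
  | zero =>
    intro L s hL
    have : L = [] := by cases L <;> simp_all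
    subst this
    rw [simLoopB, dif_neg (by simp [hasDescB]),
      rounds_of_not (show hasD ([] : List Int) = false from rfl)]
    simp
  | succ n ih =>
    intro L s hL
    rw [simLoopB]
    by_cases h : hasD L = true
    · rw [dif_pos (by rw [hasDescB_eq_hasD]; exact h)]
      rw [nextB_eq_step, ih (step L) (s+1) (by have := length_step_lt L h; omega),
        rounds_of_desc h]
      push_cast; ring
    · rw [dif_neg (by rw [hasDescB_eq_hasD]; simpa using h)]
      rw [rounds_of_not (by simpa using h)]
      simp

-- ---------- the pairs-stack computation (intermediate form of A) ----------

def popB (x : Int) : List (Int × Int) → Int → List (Int × Int) × Int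
  | [], d => ([], d)
  | p :: st, d => if x > p.1 then popB x st (max (d + 1) p.2) else (p :: st, d)

def Sfold : List Int → List (Int × Int) × Int
  | [] => ([], 0)
  | x :: xs =>
    let s := Sfold xs
    let r := popB x s.1 0
    ((x, r.2) :: r.1, if r.2 > s.2 then r.2 else s.2)

-- ---------- segment decomposition ----------

-- a segment is (head value, dominated tail); Good: tails strictly below their head,
-- heads non-decreasing left to right
def Good : List (Int × List Int) → Prop
  | [] => True
  | (v, t) :: Gs => (∀ y ∈ t, y < v) ∧ (∀ s ∈ Gs, v ≤ s.1) ∧ Good Gs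

def flat (Gs : List (Int × List Int)) : List Int := Gs.flatMap (fun s => s.1 :: s.2)

def ds (Gs : List (Int × List Int)) : List Nat := Gs.map (fun s => rounds (s.1 :: s.2))

def eatF (l : List Nat) : Nat := l.foldl (fun d e => max (d + 1) e) 0

def maxF (l : List Nat) : Nat := l.foldr max 0

def stepSeg (s : Int × List Int) : Int × List Int := (s.1, stepAux s.1 s.2)

-- ---------- splitting lemmas for the simulation ----------

lemma stepAux_split : ∀ (M : List Int) (p s : Int) (R : List Int), p ≤ s → (∀ y ∈ M, y ≤ s) →
    stepAux p (M ++ s :: R) = stepAux p M ++ s :: stepAux s R := by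
  intro M
  induction M with
  | nil => intro p s R hps _; simp [stepAux, not_lt.mpr hps]
  | cons y M' ih =>
    intro p s R hps hM
    simp only [List.cons_append, stepAux]
    rw [ih y s R (hM y (List.mem_cons_self ..)) (fun z hz => hM z (List.mem_cons_of_mem _ hz))]
    split_ifs <;> simp

lemma desc_split : ∀ (M : List Int) (p s : Int) (R : List Int), p ≤ s → (∀ y ∈ M, y ≤ s) →
    desc p (M ++ s :: R) = (desc p M || desc s R) := by
  intro M
  induction M with
  | nil => intro p s R hps _; simp [desc, not_lt.mpr hps]
  | cons y M' ih =>
    intro p s R hps hM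
    simp only [List.cons_append, desc]
    rw [ih y s R (hM y (List.mem_cons_self ..)) (fun z hz => hM z (List.mem_cons_of_mem _ hz))]
    simp [Bool.or_assoc]

lemma rounds_split : ∀ (n : Nat) (M : List Int) (s : Int) (R : List Int),
    (M ++ s :: R).length ≤ n → (∀ y ∈ M, y ≤ s) →
    rounds (M ++ s :: R) = max (rounds M) (rounds (s :: R)) := by
  intro n
  induction n with
  | zero => intro M s R h; simp at h
  | succ n ih =>
    intro M s R hlen hM
    cases M with
    | nil =>
      rw [rounds_of_not (show hasD ([] : List Int) = false from rfl)]
      simp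
    | cons x M' =>
      have hMle : ∀ y ∈ M', y ≤ s := fun y hy => hM y (List.mem_cons_of_mem _ hy)
      have hxle : x ≤ s := hM x (List.mem_cons_self ..)
      have hdesc : desc x (M' ++ s :: R) = (desc x M' || desc s R) := desc_split M' x s R hxle hMle
      by_cases hw : (desc x M' || desc s R) = true
      · -- some descent somewhere: one round happens on both views
        have hwhole : hasD ((x :: M') ++ s :: R) = true := by
          show desc x (M' ++ s :: R) = true
          rw [hdesc]; exact hw
        rw [show (x :: M') ++ s :: R = x :: (M' ++ s :: R) from rfl] at hwhole ⊢
        rw [rounds_of_desc hwhole]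
        have hstep : step (x :: (M' ++ s :: R)) = step (x :: M') ++ s :: stepAux s R := by
          show x :: stepAux x (M' ++ s :: R) = (x :: stepAux x M') ++ s :: stepAux s R
          rw [stepAux_split M' x s R hxle hMle]
          rfl
        rw [hstep]
        have hlen' : (step (x :: M') ++ s :: stepAux s R).length ≤ n := by
          have l1 := length_stepAux_le x M'
          have l2 := length_stepAux_le s R
          have hL : (x :: M' ++ s :: R).length ≤ n + 1 := hlen
          simp only [List.length_cons, List.length_append, step] at l1 l2 hL ⊢
          rcases (show desc x M' = true ∨ desc s R = true by simpa using hw) with h | h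
          · have := length_stepAux_lt x M' h; omega
          · have := length_stepAux_lt s R h; omega
        have hMem' : ∀ y ∈ step (x :: M'), y ≤ s := by
          intro y hy
          rcases List.mem_cons.mp (show y ∈ x :: stepAux x M' from hy) with h | h
          · exact h ▸ hxle
          · exact hMle y (mem_stepAux h)
        rw [ih (step (x :: M')) s (stepAux s R) hlen' hMem']
        by_cases hMd : desc x M' = true
        · rw [show rounds (x :: M') = rounds (step (x :: M')) + 1 from rounds_of_desc hMd]
          by_cases hRd : desc s R = true
          · rw [show rounds (s :: R) = rounds (step (s :: R)) + 1 from rounds_of_desc hRd,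
              show step (s :: R) = s :: stepAux s R from rfl]
            omega
          · have hRd' : desc s R = false := by simpa using hRd
            rw [stepAux_of_not_desc hRd',
              show rounds (s :: R) = 0 from rounds_of_not hRd']
            omega
        · have hMd' : desc x M' = false := by simpa using hMd
          have hRd : desc s R = true := by
            rcases (show desc x M' = true ∨ desc s R = true by simpa using hw) with h | h
            · exact absurd h hMd
            · exact h
          have hsM : step (x :: M') = x :: M' := by
            show x :: stepAux x M' = x :: M'
            rw [stepAux_of_not_desc hMd']
          rw [hsM, show rounds (x :: M') = 0 from rounds_of_not hMd',
            show rounds (s :: R) = rounds (step (s :: R)) + 1 from rounds_of_desc hRd,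
            show step (s :: R) = s :: stepAux s R from rfl]
          omega
      · -- no descent anywhere
        have hw' : desc x M' = false ∧ desc s R = false := by
          constructor
          · by_cases h : desc x M' = true
            · exact absurd (by simp [h]) hw
            · simpa using h
          · by_cases h : desc s R = true
            · exact absurd (by simp [h]) hw
            · simpa using h
        have hwhole : hasD ((x :: M') ++ s :: R) = false := by
          show desc x (M' ++ s :: R) = false
          rw [hdesc, hw'.1, hw'.2]
          rfl
        rw [show (x :: M') ++ s :: R = x :: (M' ++ s :: R) from rfl] at hwhole ⊢
        rw [rounds_of_not hwhole,
          show rounds (x :: M') = 0 from rounds_of_not hw'.1,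
          show rounds (s :: R) = 0 from rounds_of_not hw'.2]
        simp

-- ---------- Good bookkeeping ----------

lemma good_flat_lt {x : Int} : ∀ {Gs : List (Int × List Int)}, Good Gs → (∀ s ∈ Gs, s.1 < x) →
    ∀ y ∈ flat Gs, y < x := by
  intro Gs
  induction Gs with
  | nil => intro _ _ y hy; simp [flat] at hy
  | cons s Gs' ih =>
    intro hg hh y hy
    obtain ⟨v, t⟩ := s
    obtain ⟨ht, _, hg'⟩ := hg
    simp only [flat, List.flatMap_cons, List.mem_append, List.mem_cons] at hy
    rcases hy with (h | h) | h
    · exact h ▸ hh (v, t) (List.mem_cons_self ..)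
    · exact lt_trans (ht y h) (hh (v, t) (List.mem_cons_self ..))
    · exact ih hg' (fun s hs => hh s (List.mem_cons_of_mem _ hs)) y (by simpa [flat] using h)

lemma good_append : ∀ {Gs₁ Gs₂ : List (Int × List Int)}, Good Gs₁ → Good Gs₂ →
    (∀ s ∈ Gs₁, ∀ r ∈ Gs₂, s.1 ≤ r.1) → Good (Gs₁ ++ Gs₂) := by
  intro Gs₁
  induction Gs₁ with
  | nil => intro Gs₂ _ h _; simpa using h
  | cons s Gs' ih =>
    intro Gs₂ h1 h2 hcross
    obtain ⟨v, t⟩ := s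
    obtain ⟨ht, hmono, hg'⟩ := h1
    refine ⟨ht, ?_, ih hg' h2 (fun s hs => hcross s (List.mem_cons_of_mem _ hs))⟩
    intro r hr
    rcases List.mem_append.mp hr with h | h
    · exact hmono r h
    · exact hcross (v, t) (List.mem_cons_self ..) r h

lemma good_takeWhile {P : Int × List Int → Bool} : ∀ {Gs : List (Int × List Int)}, Good Gs →
    Good (Gs.takeWhile P) := by
  intro Gs
  induction Gs with
  | nil => intro _; simp [Good]
  | cons s Gs' ih =>
    intro hg
    obtain ⟨v, t⟩ := s
    obtain ⟨ht, hmono, hg'⟩ := hg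
    by_cases hP : P (v, t) = true
    · rw [List.takeWhile_cons_of_pos hP]
      exact ⟨ht, fun r hr => hmono r ((List.takeWhile_sublist _).subset hr), ih hg'⟩
    · rw [List.takeWhile_cons_of_neg (by simpa using hP)]
      simp [Good]

lemma good_dropWhile {P : Int × List Int → Bool} : ∀ {Gs : List (Int × List Int)}, Good Gs →
    Good (Gs.dropWhile P) := by
  intro Gs
  induction Gs with
  | nil => intro _; simpa [Good]
  | cons s Gs' ih =>
    intro hg
    obtain ⟨v, t⟩ := s
    obtain ⟨ht, hmono, hg'⟩ := hg
    by_cases hP : P (v, t) = true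
    · rw [List.dropWhile_cons_of_pos hP]; exact ih hg'
    · rw [List.dropWhile_cons_of_neg (by simpa using hP)]; exact ⟨ht, hmono, hg'⟩

lemma good_dropWhile_ge {x : Int} : ∀ {Gs : List (Int × List Int)}, Good Gs →
    ∀ s ∈ Gs.dropWhile (fun s => decide (s.1 < x)), x ≤ s.1 := by
  intro Gs
  induction Gs with
  | nil => intro _ s hs; simp at hs
  | cons r Gs' ih =>
    intro hg s hs
    obtain ⟨v, t⟩ := r
    obtain ⟨ht, hmono, hg'⟩ := hg
    by_cases hP : v < x
    · rw [List.dropWhile_cons_of_pos (by simpa using hP)] at hs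
      exact ih hg' s hs
    · rw [List.dropWhile_cons_of_neg (by simpa using hP)] at hs
      rcases List.mem_cons.mp hs with h | h
      · rw [h]; exact not_lt.mp hP
      · exact le_trans (not_lt.mp hP) (hmono s h)

lemma good_stepSeg : ∀ {Gs : List (Int × List Int)}, Good Gs → Good (Gs.map stepSeg) := by
  intro Gs
  induction Gs with
  | nil => intro _; simp [Good]
  | cons s Gs' ih =>
    intro hg
    obtain ⟨v, t⟩ := s
    obtain ⟨ht, hmono, hg'⟩ := hg
    refine ⟨fun y hy => ht y (mem_stepAux hy), ?_, ih hg'⟩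
    intro r hr
    obtain ⟨r', hr', rfl⟩ := List.mem_map.mp hr
    exact hmono r' hr'

lemma rounds_stepSeg (v : Int) (t : List Int) :
    rounds (v :: stepAux v t) = rounds (v :: t) - 1 := by
  by_cases h : desc v t = true
  · rw [rounds_of_desc (show hasD (v :: t) = true by simpa [hasD] using h)]
    simp [step]
  · rw [stepAux_of_not_desc (by simpa using h),
      rounds_of_not (show hasD (v :: t) = false by simpa [hasD] using h)]

lemma ds_stepSeg (Gs : List (Int × List Int)) :
    ds (Gs.map stepSeg) = (ds Gs).map (· - 1) := by
  simp only [ds, List.map_map]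
  apply List.map_congr_left
  intro s _
  exact rounds_stepSeg s.1 s.2

-- stepAux over a flattened Good list with a small pivot steps each segment
lemma stepAux_flat : ∀ (Gs : List (Int × List Int)) (p : Int), Good Gs → (∀ s ∈ Gs, p ≤ s.1) →
    stepAux p (flat Gs) = flat (Gs.map stepSeg) := by
  intro Gs
  induction Gs with
  | nil => intro p _ _; simp [flat, stepAux]
  | cons s Gs' ih =>
    intro p hg hp
    obtain ⟨v, t⟩ := s
    obtain ⟨ht, hmono, hg'⟩ := hg
    have hpv : p ≤ v := hp (v, t) (List.mem_cons_self ..)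
    rw [show flat ((v, t) :: Gs') = v :: (t ++ flat Gs') from by simp [flat]]
    simp only [stepAux]
    rw [if_neg (not_lt.mpr hpv)]
    cases Gs' with
    | nil => simp [flat, stepSeg]
    | cons r Gs'' =>
      obtain ⟨w, u⟩ := r
      have hvw : v ≤ w := hmono (w, u) (List.mem_cons_self ..)
      rw [show flat ((w, u) :: Gs'') = w :: (u ++ flat Gs'') from by simp [flat],
        stepAux_split t v w _ hvw (fun y hy => le_trans (le_of_lt (ht y hy)) hvw)]
      have hih := ih v hg' hmono
      rw [show flat ((w, u) :: Gs'') = w :: (u ++ flat Gs'') from by simp [flat]] at hih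
      simp only [stepAux] at hih
      rw [if_neg (not_lt.mpr hvw)] at hih
      rw [show stepAux v t ++ w :: stepAux w (u ++ flat Gs'')
          = stepAux v t ++ (w :: stepAux w (u ++ flat Gs'')) from rfl, hih]
      simp [flat, stepSeg]

-- eating a first segment: one stepAux from its own head as pivot
lemma stepAux_eat {v : Int} {t : List Int} {Gs' : List (Int × List Int)}
    (hg : Good ((v, t) :: Gs')) :
    stepAux v (t ++ flat Gs') = stepAux v t ++ flat (Gs'.map stepSeg) := by
  obtain ⟨ht, hmono, hg'⟩ := hg
  cases Gs' with
  | nil => simp [flat]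
  | cons r Gs'' =>
    obtain ⟨w, u⟩ := r
    have hvw : v ≤ w := hmono (w, u) (List.mem_cons_self ..)
    rw [show flat ((w, u) :: Gs'') = w :: (u ++ flat Gs'') from by simp [flat],
      stepAux_split t v w _ hvw (fun y hy => le_trans (le_of_lt (ht y hy)) hvw)]
    have hih := stepAux_flat ((w, u) :: Gs'') v hg' hmono
    rw [show flat ((w, u) :: Gs'') = w :: (u ++ flat Gs'') from by simp [flat]] at hih
    simp only [stepAux] at hih
    rw [if_neg (not_lt.mpr hvw)] at hih
    rw [show stepAux v t ++ w :: stepAux w (u ++ flat Gs'')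
        = stepAux v t ++ (w :: stepAux w (u ++ flat Gs'')) from rfl, hih]

-- ---------- fold arithmetic ----------

lemma eat_foldl_ge : ∀ (l : List Nat) (a : Nat),
    a ≤ l.foldl (fun d e => max (d + 1) e) a ∧
    ∀ e ∈ l, e ≤ l.foldl (fun d e => max (d + 1) e) a := by
  intro l
  induction l with
  | nil => intro a; exact ⟨le_rfl, by simp⟩
  | cons e l' ih =>
    intro a
    obtain ⟨h1, h2⟩ := ih (max (a + 1) e)
    refine ⟨le_trans (by omega) h1, ?_⟩
    intro e' he'
    rcases List.mem_cons.mp he' with h | h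
    · subst h; exact le_trans (by omega) h1
    · exact h2 e' h

lemma eat_foldl_mono : ∀ (l : List Nat) (a b : Nat), a ≤ b →
    l.foldl (fun d e => max (d + 1) e) a ≤ l.foldl (fun d e => max (d + 1) e) b := by
  intro l
  induction l with
  | nil => intro a b h; simpa
  | cons e l' ih =>
    intro a b h
    simp only [List.foldl_cons]
    exact ih _ _ (by omega)

lemma eat_pred : ∀ (l : List Nat) (a : Nat), 1 ≤ a →
    (l.map (· - 1)).foldl (fun d e => max (d + 1) e) (a - 1) + 1
      = l.foldl (fun d e => max (d + 1) e) a := by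
  intro l
  induction l with
  | nil =>
    intro a h
    simp only [List.map_nil, List.foldl_nil]
    omega
  | cons e l' ih =>
    intro a h
    simp only [List.map_cons, List.foldl_cons]
    rw [show max (a - 1 + 1) (e - 1) = max (a + 1) e - 1 by omega]
    exact ih (max (a + 1) e) (by omega)

lemma eatF_append_pred {es l : List Nat} {d : Nat} (h : eatF es = d - 1) :
    eatF (es ++ l.map (· - 1)) + 1 = eatF (d :: l) := by
  have h1 : eatF (es ++ l.map (· - 1))
      = (l.map (· - 1)).foldl (fun d e => max (d + 1) e) (d - 1) := by
    simp only [eatF, List.foldl_append]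
    rw [show List.foldl (fun d e => max (d + 1) e) 0 es = d - 1 from h]
  rw [h1, show d - 1 = max 1 d - 1 by omega, eat_pred l (max 1 d) (by omega)]
  simp only [eatF, List.foldl_cons]

lemma maxF_append : ∀ (l₁ l₂ : List Nat), maxF (l₁ ++ l₂) = max (maxF l₁) (maxF l₂) := by
  intro l₁ l₂
  induction l₁ with
  | nil => simp [maxF]
  | cons e l' ih => simp only [maxF, List.cons_append, List.foldr_cons] at *; omega

lemma maxF_le_eatF (l : List Nat) : maxF l ≤ eatF l := by
  induction l with
  | nil => simp [maxF, eatF]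
  | cons e l' ih =>
    simp only [maxF, eatF, List.foldr_cons, List.foldl_cons] at *
    have h1 := (eat_foldl_ge l' (max (0 + 1) e)).1
    have h2 := eat_foldl_mono l' 0 (max (0 + 1) e) (by omega)
    omega

-- ---------- every list decomposes into Good segments ----------

lemma exists_segs : ∀ (L : List Int), ∃ Gs, Good Gs ∧ flat Gs = L ∧ ∀ s ∈ Gs, s.1 ∈ L := by
  intro L
  induction L with
  | nil => exact ⟨[], by simp [Good], by simp [flat], by simp⟩
  | cons x L' ih =>
    obtain ⟨Gs', hg, hf, hmem⟩ := ih
    set P : Int × List Int → Bool := fun s => decide (s.1 < x) with hP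
    refine ⟨(x, flat (Gs'.takeWhile P)) :: Gs'.dropWhile P, ?_, ?_, ?_⟩
    · refine ⟨?_, ?_, good_dropWhile hg⟩
      · refine good_flat_lt (good_takeWhile hg) (fun s hs => ?_)
        have := List.mem_takeWhile_imp hs
        rw [hP] at this
        simpa using this
      · exact good_dropWhile_ge hg
    · show flat ((x, flat (Gs'.takeWhile P)) :: Gs'.dropWhile P) = x :: L'
      have hfl : flat ((x, flat (Gs'.takeWhile P)) :: Gs'.dropWhile P)
          = x :: ((Gs'.takeWhile P).flatMap (fun s => s.1 :: s.2)
              ++ (Gs'.dropWhile P).flatMap (fun s => s.1 :: s.2)) := by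
        simp [flat]
      rw [hfl, ← List.flatMap_append, List.takeWhile_append_dropWhile,
        show Gs'.flatMap (fun s => s.1 :: s.2) = flat Gs' from rfl, hf]
    · intro s hs
      rcases List.mem_cons.mp hs with h | h
      · rw [h]; exact List.mem_cons_self ..
      · exact List.mem_cons_of_mem _ (hmem s ((List.dropWhile_sublist _).subset h))

-- ---------- the eating theorem (mutual with tail decomposition) ----------

def EatP (n : Nat) : Prop := ∀ (x : Int) (Gs : List (Int × List Int)),
  (flat Gs).length < n → Good Gs → (∀ s ∈ Gs, s.1 < x) →
  rounds (x :: flat Gs) = eatF (ds Gs)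

def TailP (n : Nat) : Prop := ∀ (v : Int) (t : List Int),
  t.length < n → (∀ y ∈ t, y < v) →
  ∃ Hs, Good Hs ∧ flat Hs = stepAux v t ∧ (∀ s ∈ Hs, s.1 < v) ∧
    eatF (ds Hs) = rounds (v :: t) - 1

lemma length_flat_stepSeg_le (Gs : List (Int × List Int)) :
    (flat (Gs.map stepSeg)).length ≤ (flat Gs).length := by
  induction Gs with
  | nil => simp [flat]
  | cons s Gs' ih =>
    simp only [flat, List.map_cons, List.flatMap_cons, List.length_append, List.length_cons] at *
    have := length_stepAux_le s.1 s.2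
    simp only [stepSeg] at *
    omega

lemma eat_tail : ∀ (n : Nat), EatP n ∧ TailP n := by
  intro n
  induction n using Nat.strong_induction_on with
  | _ n ih =>
    have heat : EatP n := by
      intro x Gs hlen hg hlt
      cases Gs with
      | nil =>
        simp only [flat, List.flatMap_nil, ds, List.map_nil]
        rw [rounds_of_not (by simp [hasD, desc])]
        simp [eatF]
      | cons s Gs' =>
        obtain ⟨v, t⟩ := s
        obtain ⟨ht, hmono, hg'⟩ := hg
        have hvx : v < x := hlt (v, t) (List.mem_cons_self ..)
        have hflat : flat ((v, t) :: Gs') = v :: (t ++ flat Gs') := by simp [flat]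
        rw [hflat]
        have hhd : hasD (x :: v :: (t ++ flat Gs')) = true := by
          simp [hasD, desc, hvx]
        rw [rounds_of_desc hhd]
        have hstep : step (x :: v :: (t ++ flat Gs')) = x :: stepAux v (t ++ flat Gs') := by
          simp [step, stepAux, hvx]
        rw [hstep, stepAux_eat ⟨ht, hmono, hg'⟩]
        -- tail decomposition of the first segment
        have htail := (ih (flat ((v, t) :: Gs')).length (by omega)).2 v t
          (by rw [hflat]; simp) ht
        obtain ⟨Hs, hgH, hfH, hltH, heH⟩ := htail
        have hcomb : Good (Hs ++ Gs'.map stepSeg) := by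
          refine good_append hgH (good_stepSeg hg') ?_
          intro s hs r hr
          obtain ⟨r', hr', rfl⟩ := List.mem_map.mp hr
          exact le_trans (le_of_lt (hltH s hs)) (hmono r' hr')
        have hflatc : stepAux v t ++ flat (Gs'.map stepSeg) = flat (Hs ++ Gs'.map stepSeg) := by
          simp only [flat, List.flatMap_append]
          rw [show Hs.flatMap (fun s => s.1 :: s.2) = flat Hs from rfl, hfH]
        rw [hflatc]
        have hrec := (ih (flat ((v, t) :: Gs')).length (by omega)).1 x (Hs ++ Gs'.map stepSeg)
          (by
            have h1 : (flat (Hs ++ Gs'.map stepSeg)).length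
                = (flat Hs).length + (flat (Gs'.map stepSeg)).length := by
              simp [flat, List.flatMap_append]
            have h2 := length_flat_stepSeg_le Gs'
            have h3 : (flat Hs).length ≤ t.length := by
              rw [hfH]; exact length_stepAux_le v t
            rw [hflat]
            simp only [List.length_cons, List.length_append] at *
            omega)
          hcomb
          (by
            intro s hs
            rcases List.mem_append.mp hs with h | h
            · exact lt_trans (hltH s h) hvx
            · obtain ⟨r', hr', rfl⟩ := List.mem_map.mp h
              exact hlt r' (List.mem_cons_of_mem _ hr'))
        rw [hrec]
        have hds : ds (Hs ++ Gs'.map stepSeg) = ds Hs ++ (ds Gs').map (· - 1) := by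
          simp only [ds, List.map_append]
          rw [show (Gs'.map stepSeg).map (fun s => rounds (s.1 :: s.2)) = ds (Gs'.map stepSeg)
            from rfl, ds_stepSeg]
          rfl
        rw [hds]
        have := eatF_append_pred (l := ds Gs') (d := rounds (v :: t)) heH
        rw [this]
        simp [ds]
    have htail : TailP n := by
      intro v t hlen ht
      obtain ⟨Ts, hgT, hfT, hmemT⟩ := exists_segs t
      cases Ts with
      | nil =>
        have ht0 : t = [] := by simpa [flat] using hfT.symm
        subst ht0
        refine ⟨[], by simp [Good], by simp [flat, stepAux], by simp, ?_⟩
        rw [rounds_of_not (by simp [hasD, desc])]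
        simp [eatF, ds]
      | cons s Ts' =>
        obtain ⟨w, u⟩ := s
        obtain ⟨hu, hmonoT, hgT'⟩ := hgT
        have hwv : w < v := ht w (by rw [← hfT]; simp [flat])
        have hflatT : flat ((w, u) :: Ts') = w :: (u ++ flat Ts') := by simp [flat]
        have ht' : t = w :: (u ++ flat Ts') := by rw [← hfT, hflatT]
        -- one stepAux from v eats w and steps the rest
        have hstep1 : stepAux v t = stepAux w (u ++ flat Ts') := by
          rw [ht']; simp [stepAux, hwv]
        rw [hstep1, stepAux_eat ⟨hu, hmonoT, hgT'⟩]
        -- recursive tail decomposition of the first sub-segment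
        have hrecT := (ih (u.length + 1) (by rw [ht'] at hlen; simp at hlen; omega)).2 w u
          (by omega) hu
        obtain ⟨Hs₁, hgH, hfH, hltH, heH⟩ := hrecT
        refine ⟨Hs₁ ++ Ts'.map stepSeg, ?_, ?_, ?_, ?_⟩
        · refine good_append hgH (good_stepSeg hgT') ?_
          intro s hs r hr
          obtain ⟨r', hr', rfl⟩ := List.mem_map.mp hr
          exact le_trans (le_of_lt (hltH s hs)) (hmonoT r' hr')
        · simp only [flat, List.flatMap_append]
          rw [show Hs₁.flatMap (fun s => s.1 :: s.2) = flat Hs₁ from rfl, hfH]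
        · intro s hs
          rcases List.mem_append.mp hs with h | h
          · exact lt_trans (hltH s h) hwv
          · obtain ⟨r', hr', rfl⟩ := List.mem_map.mp h
            refine ht (stepSeg r').1 ?_
            show r'.1 ∈ t
            rw [← hfT]
            show r'.1 ∈ ((w, u) :: Ts').flatMap (fun s => s.1 :: s.2)
            exact List.mem_flatMap.mpr ⟨r', List.mem_cons_of_mem _ hr', List.mem_cons_self ..⟩
        · -- eatF value is rounds (v :: t) - 1
          have hrt : rounds (v :: t) = eatF (ds ((w, u) :: Ts')) := by
            have := heat v ((w, u) :: Ts') (by rw [hfT]; exact hlen) ⟨hu, hmonoT, hgT'⟩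
              (by
                intro s hs
                refine ht s.1 ?_
                rw [← hfT]
                show s.1 ∈ ((w, u) :: Ts').flatMap (fun r => r.1 :: r.2)
                exact List.mem_flatMap.mpr ⟨s, hs, List.mem_cons_self ..⟩)
            rw [← hfT]; exact this
          have hds : ds (Hs₁ ++ Ts'.map stepSeg) = ds Hs₁ ++ (ds Ts').map (· - 1) := by
            simp only [ds, List.map_append]
            rw [show (Ts'.map stepSeg).map (fun s => rounds (s.1 :: s.2)) = ds (Ts'.map stepSeg)
              from rfl, ds_stepSeg]
            rfl
          rw [hds]
          have hplus := eatF_append_pred (l := ds Ts') (d := rounds (w :: u)) heH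
          have hone : 1 ≤ eatF (rounds (w :: u) :: ds Ts') := by
            simp only [eatF, List.foldl_cons]
            have := (eat_foldl_ge (ds Ts') (max (0 + 1) (rounds (w :: u)))).1
            omega
          rw [hrt]
          simp only [ds, List.map_cons] at hplus hone ⊢
          omega
    exact ⟨heat, htail⟩

-- the segment maximum computes the round count
lemma segmax : ∀ (Gs : List (Int × List Int)), Good Gs → rounds (flat Gs) = maxF (ds Gs) := by
  intro Gs
  induction Gs with
  | nil =>
    intro _
    simp only [flat, List.flatMap_nil, ds, List.map_nil]
    rw [rounds_of_not (show hasD ([] : List Int) = false from rfl)]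
    simp [maxF]
  | cons s Gs' ih =>
    intro hg
    obtain ⟨v, t⟩ := s
    obtain ⟨ht, hmono, hg'⟩ := hg
    cases Gs' with
    | nil =>
      simp only [flat, List.flatMap_cons, List.flatMap_nil, List.append_nil, ds, List.map_cons,
        List.map_nil]
      simp [maxF]
    | cons r Gs'' =>
      obtain ⟨w, u⟩ := r
      have hvw : v ≤ w := hmono (w, u) (List.mem_cons_self ..)
      have hflat : flat ((v, t) :: (w, u) :: Gs'') = (v :: t) ++ w :: (u ++ flat Gs'') := by
        simp [flat]
      rw [hflat, rounds_split ((v :: t) ++ w :: (u ++ flat Gs'')).length (v :: t) w _ le_rfl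
        (by
          intro y hy
          rcases List.mem_cons.mp hy with h | h
          · exact h ▸ hvw
          · exact le_trans (le_of_lt (ht y h)) hvw)]
      have hrec := ih hg'
      rw [show flat ((w, u) :: Gs'') = w :: (u ++ flat Gs'') by simp [flat]] at hrec
      rw [hrec]
      simp [ds, maxF]

-- ---------- the stack computation tracks the segment decomposition ----------

def pairize (s : Int × List Int) : Int × Int := (s.1, (rounds (s.1 :: s.2) : Int))

lemma popB_cast (x : Int) : ∀ (Gs : List (Int × List Int)) (a : Nat),
    popB x (Gs.map pairize) (a : Int)
      = ((Gs.dropWhile (fun s => decide (s.1 < x))).map pairize,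
         ((((Gs.takeWhile (fun s => decide (s.1 < x))).map
            (fun s => rounds (s.1 :: s.2))).foldl (fun d e => max (d + 1) e) a : Nat) : Int)) := by
  intro Gs
  induction Gs with
  | nil => intro a; simp [popB]
  | cons s Gs' ih =>
    intro a
    by_cases h : s.1 < x
    · rw [List.map_cons, show pairize s = (s.1, (rounds (s.1 :: s.2) : Int)) from rfl]
      simp only [popB, if_pos h]
      rw [List.takeWhile_cons_of_pos (by simpa using h),
        List.dropWhile_cons_of_pos (by simpa using h)]
      have : max ((a : Int) + 1) ((rounds (s.1 :: s.2) : Nat) : Int)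
          = ((max (a + 1) (rounds (s.1 :: s.2)) : Nat) : Int) := by push_cast; rfl
      rw [this, ih (max (a + 1) (rounds (s.1 :: s.2)))]
      simp
    · rw [List.map_cons, show pairize s = (s.1, (rounds (s.1 :: s.2) : Int)) from rfl]
      simp only [popB, if_neg h]
      rw [List.takeWhile_cons_of_neg (by simpa using h),
        List.dropWhile_cons_of_neg (by simpa using h)]
      simp [pairize]

lemma sfold_main : ∀ (L : List Int), ∃ Gs, Good Gs ∧ flat Gs = L ∧
    (Sfold L).1 = Gs.map pairize ∧ (Sfold L).2 = ((maxF (ds Gs) : Nat) : Int) := by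
  intro L
  induction L with
  | nil => exact ⟨[], by simp [Good], by simp [flat], by simp [Sfold], by simp [Sfold, maxF, ds]⟩
  | cons x L' ih =>
    obtain ⟨Gs, hg, hf, hst, hans⟩ := ih
    set P : Int × List Int → Bool := fun s => decide (s.1 < x) with hPdef
    set G₁ := Gs.takeWhile P with hG1
    set G₂ := Gs.dropWhile P with hG2
    have hgood₁ : Good G₁ := good_takeWhile hg
    have hlt₁ : ∀ s ∈ G₁, s.1 < x := by
      intro s hs
      have := List.mem_takeWhile_imp (hG1 ▸ hs)
      rw [hPdef] at this
      simpa using this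
    have heat := (eat_tail ((flat G₁).length + 1)).1 x G₁ (by omega) hgood₁ hlt₁
    refine ⟨(x, flat G₁) :: G₂, ?_, ?_, ?_, ?_⟩
    · exact ⟨good_flat_lt hgood₁ hlt₁, good_dropWhile_ge hg, good_dropWhile hg⟩
    · show flat ((x, flat G₁) :: G₂) = x :: L'
      have hfl : flat ((x, flat G₁) :: G₂)
          = x :: (G₁.flatMap (fun s => s.1 :: s.2) ++ G₂.flatMap (fun s => s.1 :: s.2)) := by
        simp [flat]
      rw [hfl, ← List.flatMap_append, hG1, hG2, List.takeWhile_append_dropWhile,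
        show Gs.flatMap (fun s => s.1 :: s.2) = flat Gs from rfl, hf]
    · have hsh : (Sfold (x :: L')).1
          = (x, (popB x (Sfold L').1 0).2) :: (popB x (Sfold L').1 0).1 := rfl
      rw [hsh, hst, show (0 : Int) = ((0 : Nat) : Int) from rfl, popB_cast,
        ← hPdef, ← hG1, ← hG2]
      simp only [List.map_cons]
      congr 1
      simp only [pairize, heat, eatF, ds]
    · have hsh : (Sfold (x :: L')).2
          = (if (popB x (Sfold L').1 0).2 > (Sfold L').2 then (popB x (Sfold L').1 0).2
             else (Sfold L').2) := rfl
      rw [hsh, hst, hans, show (0 : Int) = ((0 : Nat) : Int) from rfl, popB_cast,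
        ← hPdef, ← hG1, ← hG2]
      have hmax : maxF (ds Gs) = max (maxF (ds G₁)) (maxF (ds G₂)) := by
        rw [show ds Gs = ds G₁ ++ ds G₂ by
          simp only [ds, hG1, hG2, ← List.map_append, List.takeWhile_append_dropWhile]]
        exact maxF_append _ _
      have hge : maxF (ds G₁) ≤ eatF (ds G₁) := maxF_le_eatF _
      have heF : ((G₁.map (fun s => rounds (s.1 :: s.2))).foldl (fun d e => max (d + 1) e) 0)
          = eatF (ds G₁) := by simp [eatF, ds]
      have hRHS : maxF (ds ((x, flat G₁) :: G₂)) = max (eatF (ds G₁)) (maxF (ds G₂)) := by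
        simp only [ds, List.map_cons, maxF, List.foldr_cons, heat]
      rw [heF, hRHS]
      dsimp only
      split_ifs with hc
      · have hc' : maxF (ds Gs) < eatF (ds G₁) := by exact_mod_cast hc
        have hm : max (eatF (ds G₁)) (maxF (ds G₂)) = eatF (ds G₁) := by
          rw [hmax] at hc'; omega
        rw [hm]
      · have hc' : ¬ maxF (ds Gs) < eatF (ds G₁) := by exact_mod_cast hc
        have hm : max (eatF (ds G₁)) (maxF (ds G₂)) = maxF (ds Gs) := by
          rw [hmax] at hc' ⊢; omega
        rw [hm]

-- the Sfold answer is the round count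
lemma sfold_eq_rounds (L : List Int) : (Sfold L).2 = ((rounds L : Nat) : Int) := by
  obtain ⟨Gs, hg, hf, _, hans⟩ := sfold_main L
  rw [hans, ← hf, segmax Gs hg]

-- ---------- port A equals the pairs-stack computation ----------

-- the countdown index list [m-1, …, 1, 0]
def idxs : Nat → List Int
  | 0 => []
  | m + 1 => (m : Int) :: idxs m

lemma pyRange_eq_idxs (m : Nat) : PySem.List.pyRange ((m : Int) - 1) (-1) (-1) = idxs m := by
  induction m with
  | zero => simp [idxs, PySem.List.pyRange_neg_one_eq_nil]
  | succ m ih =>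
    rw [show ((m + 1 : Nat) : Int) - 1 = (m : Int) by push_cast; ring,
        PySem.List.pyRange_neg_one_cons (by omega)]
    simpa [idxs] using ih

lemma mem_idxs {m : Nat} {j : Int} (h : j ∈ idxs m) : ∃ k : Nat, j = (k : Int) ∧ k < m := by
  induction m with
  | zero => simp [idxs] at h
  | succ m ih =>
    simp only [idxs, List.mem_cons] at h
    rcases h with h | h
    · exact ⟨m, h, by omega⟩
    · obtain ⟨k, hk, hkm⟩ := ih h
      exact ⟨k, hk, by omega⟩

lemma map_idxs_eq_reverse (A : List Int) :
    (idxs A.length).map (fun i => A.getD i.toNat 0) = A.reverse := by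
  induction A using List.reverseRecOn with
  | nil => simp [idxs]
  | append_singleton B a ih =>
    rw [show (B ++ [a]).length = B.length + 1 by simp]
    simp only [idxs, List.map_cons, List.reverse_append, List.reverse_singleton,
      List.singleton_append]
    have h1 : (B ++ [a]).getD ((B.length : Int)).toNat 0 = a := by
      simp [List.getD_eq_getElem?_getD]
    rw [h1]
    congr 1
    rw [← ih]
    apply List.map_congr_left
    intro j hj
    obtain ⟨k, rfl, hk⟩ := mem_idxs hj
    simp [List.getD_eq_getElem?_getD, List.getElem?_append_left hk]

-- the pair stored by the pairs stack for an A-side stack index j, given the current dp array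
def pairOf (Av dp : List Int) (j : Int) : Int × Int := (Av.getD j.toNat 0, dp.getD j.toNat 0)

-- the inner while loops simulate each other
lemma inner_sim (Av : List Int) (m : Nat) :
    ∀ (stI : List Int) (dp : List Int) (ans d : Int),
      (∀ j ∈ stI, ∃ k : Nat, j = (k : Int) ∧ m < k) →
      dp.getD m 0 = d → d ≤ ans → m < dp.length →
      (∀ j ∈ (whileA Av (m : Int) stI dp ans).1, j ∈ stI) ∧
      (popB (Av.getD m 0) (stI.map (pairOf Av dp)) d).1
        = (whileA Av (m : Int) stI dp ans).1.map (pairOf Av dp) ∧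
      (∀ k : Nat, (whileA Av (m : Int) stI dp ans).2.1.getD k 0
        = if k = m then (popB (Av.getD m 0) (stI.map (pairOf Av dp)) d).2 else dp.getD k 0) ∧
      (whileA Av (m : Int) stI dp ans).2.1.length = dp.length ∧
      (whileA Av (m : Int) stI dp ans).2.2
        = max ans (popB (Av.getD m 0) (stI.map (pairOf Av dp)) d).2 ∧
      d ≤ (popB (Av.getD m 0) (stI.map (pairOf Av dp)) d).2 := by
  intro stI
  induction stI with
  | nil =>
    intro dp ans d _ hd hda _
    refine ⟨by simp [whileA], by simp [whileA, popB], ?_, by simp [whileA], ?_, ?_⟩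
    · intro k
      simp only [whileA]
      split_ifs with hk
      · subst hk; exact hd
      · rfl
    · simp only [whileA]
      exact (max_eq_left hda).symm
    · simp [popB]
  | cons j st ih =>
    intro dp ans d hstk hd hda hm
    obtain ⟨k0, rfl, hk0⟩ := hstk j (List.mem_cons_self ..)
    by_cases hc : Av.getD k0 0 < Av.getD m 0
    · -- the pop branch
      have hcondA : PySem.List.pyGetD Av (m : Int) 0 > PySem.List.pyGetD Av ((k0 : Nat) : Int) 0 := by
        simpa using hc
      have hA : whileA Av (m : Int) ((k0 : Int) :: st) dp ans
          = whileA Av (m : Int) st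
              (dp.set m (max (d + 1) (dp.getD k0 0)))
              (max ans (max (d + 1) (dp.getD k0 0))) := by
        have hd' : dp[m]?.getD 0 = d := by rw [← List.getD_eq_getElem?_getD]; exact hd
        simp only [whileA, if_pos hcondA]
        simp [hd']
      have hB : popB (Av.getD m 0) (((k0 : Int) :: st).map (pairOf Av dp)) d
          = popB (Av.getD m 0) (st.map (pairOf Av dp)) (max (d + 1) (dp.getD k0 0)) := by
        simp only [List.map_cons, popB, pairOf]
        rw [if_pos (by simpa using hc)]
        simp
      set v := max (d + 1) (dp.getD k0 0) with hv
      have hmapeq : st.map (pairOf Av (dp.set m v)) = st.map (pairOf Av dp) := by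
        apply List.map_congr_left
        intro j hj
        obtain ⟨k, rfl, hk⟩ := hstk j (List.mem_cons_of_mem _ hj)
        simp only [pairOf, Int.toNat_natCast, List.getD_eq_getElem?_getD]
        rw [List.getElem?_set_ne (by omega)]
      have ihh := ih (dp.set m v) (max ans v) v
        (fun j hj => hstk j (List.mem_cons_of_mem _ hj))
        (by rw [List.getD_eq_getElem?_getD, List.getElem?_set_self (by omega)]; rfl)
        (le_max_right _ _) (by simpa using hm)
      rw [hmapeq] at ihh
      obtain ⟨i1, i2, i3, i4, i5, i6⟩ := ihh
      rw [hA, hB]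
      refine ⟨fun j hj => List.mem_cons_of_mem _ (i1 j hj), ?_, ?_, ?_, ?_, ?_⟩
      · rw [i2]
        apply List.map_congr_left
        intro j hj
        obtain ⟨k, rfl, hk⟩ := hstk j (List.mem_cons_of_mem _ (i1 j hj))
        simp only [pairOf, Int.toNat_natCast, List.getD_eq_getElem?_getD]
        rw [List.getElem?_set_ne (by omega)]
      · intro k
        rw [i3 k]
        split_ifs with hk
        · rfl
        · rw [List.getD_eq_getElem?_getD, List.getD_eq_getElem?_getD,
            List.getElem?_set_ne (by omega)]
      · rw [i4]; simp
      · rw [i5, max_assoc, max_eq_right i6]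
      · exact le_trans (by omega) (le_trans (le_max_left _ _) i6)
    · -- no pop: the loop stops here
      have hcondA : ¬ (PySem.List.pyGetD Av (m : Int) 0 > PySem.List.pyGetD Av ((k0 : Nat) : Int) 0) := by
        simpa using hc
      have hA : whileA Av (m : Int) ((k0 : Int) :: st) dp ans = ((k0 : Int) :: st, dp, ans) := by
        simp only [whileA, if_neg hcondA]
      have hB : popB (Av.getD m 0) (((k0 : Int) :: st).map (pairOf Av dp)) d
          = (((k0 : Int) :: st).map (pairOf Av dp), d) := by
        simp only [List.map_cons, popB, pairOf]
        rw [if_neg (by simpa using hc)]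
      rw [hA, hB]
      refine ⟨fun j hj => hj, rfl, ?_, rfl, (max_eq_left hda).symm, le_rfl⟩
      intro k
      split_ifs with hk
      · subst hk; exact hd
      · rfl

-- the outer loops simulate each other
lemma outer_sim (Av : List Int) :
    ∀ (m : Nat) (stI : List Int) (dp : List Int) (ans : Int),
      (∀ j ∈ stI, ∃ k : Nat, j = (k : Int) ∧ m ≤ k) →
      (∀ k : Nat, k < m → dp.getD k 0 = 0) →
      0 ≤ ans → dp.length = Av.length → m ≤ Av.length →
      ((idxs m).foldl
        (fun (s : List Int × List Int × Int) i =>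
          let r := whileA Av i s.1 s.2.1 s.2.2
          (i :: r.1, r.2.1, r.2.2))
        (stI, dp, ans)).2.2
      = (((idxs m).map (fun i => Av.getD i.toNat 0)).foldl
          (fun (s : List (Int × Int) × Int) x =>
            let r := popB x s.1 0
            ((x, r.2) :: r.1, if r.2 > s.2 then r.2 else s.2))
          (stI.map (pairOf Av dp), ans)).2 := by
  intro m
  induction m with
  | zero => intro stI dp ans _ _ _ _ _; simp [idxs]
  | succ m ih =>
    intro stI dp ans hstk hzero hans hlen hm
    obtain ⟨i1, i2, i3, i4, i5, i6⟩ := inner_sim Av m stI dp ans 0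
      (fun j hj => by obtain ⟨k, hk, hmk⟩ := hstk j hj; exact ⟨k, hk, by omega⟩)
      (hzero m (by omega)) hans (by omega)
    set W := whileA Av (m : Int) stI dp ans with hW
    set P := popB (Av.getD m 0) (stI.map (pairOf Av dp)) 0 with hP
    simp only [idxs, List.foldl_cons, List.map_cons, ← hW, ← hP, Int.toNat_natCast]
    have hansB : (if P.2 > ans then P.2 else ans) = max ans P.2 := by
      split_ifs with h
      · exact (max_eq_right h.le).symm
      · exact (max_eq_left (by omega)).symm
    have hstack : ((m : Int) :: W.1).map (pairOf Av W.2.1)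
        = (Av.getD m 0, P.2) :: P.1 := by
      simp only [List.map_cons]
      have hm' : pairOf Av W.2.1 (m : Int) = (Av.getD m 0, P.2) := by
        simp only [pairOf, Int.toNat_natCast]
        rw [i3 m, if_pos rfl]
      rw [hm', i2]
      congr 1
      apply List.map_congr_left
      intro j hj
      obtain ⟨k, rfl, hmk⟩ := hstk j (i1 j hj)
      simp only [pairOf, Int.toNat_natCast]
      rw [i3 k, if_neg (by omega)]
    have hrec := ih ((m : Int) :: W.1) W.2.1 (max ans P.2)
      (by
        intro j hj
        rcases List.mem_cons.mp hj with h | h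
        · exact ⟨m, h, le_rfl⟩
        · obtain ⟨k, hk, hmk⟩ := hstk j (i1 j h)
          exact ⟨k, hk, by omega⟩)
      (by
        intro k hk
        rw [i3 k, if_neg (by omega)]
        exact hzero k (by omega))
      (le_trans hans (le_max_left _ _))
      (by rw [i4]; exact hlen) (by omega)
    rw [← i5] at hrec
    rw [hrec, hstack, i5, hansB]

-- Sfold is the foldr form of the reverse foldl
lemma foldr_eq_sfold : ∀ (L : List Int),
    L.foldr (fun x (s : List (Int × Int) × Int) =>
      (fun (s : List (Int × Int) × Int) x =>
        let r := popB x s.1 0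
        ((x, r.2) :: r.1, if r.2 > s.2 then r.2 else s.2)) s x) ([], 0) = Sfold L := by
  intro L
  induction L with
  | nil => rfl
  | cons x L' ih => simp only [List.foldr_cons, ih]; rfl

lemma totalSteps_eq_sfold (A : List Int) : totalSteps A = (Sfold A).2 := by
  simp only [totalSteps]
  rw [pyRange_eq_idxs A.length]
  have h := outer_sim A A.length [] (List.replicate A.length 0) 0
    (by simp) (by intro k _; simp [List.getD_eq_getElem?_getD]) le_rfl (by simp) le_rfl
  simp only [List.map_nil] at h
  rw [h, map_idxs_eq_reverse A, List.foldl_reverse, foldr_eq_sfold]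

-- ===== VERDICT (by name: the statement is the Claim_ definition above) =====
theorem totalSteps_spec : Claim_equal_totalSteps := by
  intro A _
  show totalSteps A = totalSteps_alt A
  rw [totalSteps_eq_sfold, sfold_eq_rounds, totalSteps_alt,
    simLoopB_eq A.length A 0 le_rfl]
  simp
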